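-- pv_equiv track=rewrite | github.com/Jatin-kaushik/DSAlvl2-python | hashmapandheaplvl2/smallestsubarrwithlongfreq.py | solve
-- ===== SOURCE A (Python) =====
-- def solve(n ,arr):
--     res = [0,0,0]
--     dict1 = {}
--     mf = -1
--     for i in range(n):
--         ele = arr[i]
--         if ele in dict1:
--             dict1[ele].append(i)
--         else:
--             dict1[ele] = [i]
--
--         f = dict1[ele]
--         if len(f) > mf:
--             mf = len(f)
--             res[0], res[1], res[2] = ele, f[0], f[-1]
--     return res
-- ===== SOURCE B (Python) =====
-- def solve(n, arr):
--     res = [0, 0, 0]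
--     if n <= 0:
--         return res
--     prefix = arr[:n]
--     best = max(prefix.count(x) for x in prefix)
--     for i in range(n):
--         ele = prefix[i]
--         if prefix[:i + 1].count(ele) == best:
--             return [ele, prefix.index(ele), i]
--     return res  # unreachable: best is always attained in the loop
-- ===== Notes on version B (the rewrite author's own statement) =====
-- stated objective: simpler
-- what changed: Replaces the single-pass dict-of-occurrence-lists with online max tracking by a dict-free two-phase decomposition: compute the maximum frequency of the n-prefix with list.count, then scan for the first index whose running count reaches it and read the answer off with list.index.
import Mathlib
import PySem

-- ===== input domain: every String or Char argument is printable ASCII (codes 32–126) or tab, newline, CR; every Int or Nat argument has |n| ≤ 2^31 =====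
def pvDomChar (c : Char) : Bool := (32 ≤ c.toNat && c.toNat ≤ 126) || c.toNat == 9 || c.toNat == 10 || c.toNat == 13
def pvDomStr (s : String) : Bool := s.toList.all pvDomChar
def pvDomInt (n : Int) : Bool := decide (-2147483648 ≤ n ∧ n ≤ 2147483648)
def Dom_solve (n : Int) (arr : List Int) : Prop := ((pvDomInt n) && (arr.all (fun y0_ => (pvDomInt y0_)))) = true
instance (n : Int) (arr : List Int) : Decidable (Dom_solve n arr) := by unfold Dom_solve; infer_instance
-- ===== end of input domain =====

-- B replaces A's single-pass dict-of-occurrence-lists with a dict-free two-phase scan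
-- (max frequency via list.count, then locate its first attainment); same return value.

-- ===== PORT A =====
def solveStepA (arr : List Int) (s : (Int × Int × Int) × PySem.Dict Int (List Int) × Int)
    (i : Int) : (Int × Int × Int) × PySem.Dict Int (List Int) × Int :=
  let res := s.1
  let dict1 := s.2.1
  let mf := s.2.2
  let ele := PySem.List.pyGetD arr i 0   -- arr[i]; Pre_solve keeps every i of range(n) in range
  let dict1 := if dict1.contains ele then dict1.modify ele [] (fun f => f ++ [i])
               else dict1.insert ele [i]
  let f := dict1.getD ele []
  if (f.length : Int) > mf then ((ele, f.headD 0, f.getLastD 0), dict1, (f.length : Int))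
  else (res, dict1, mf)

def solve (n : Int) (arr : List Int) : List Int :=
  let s := (PySem.List.pyRange 0 n 1).foldl (solveStepA arr) ((0, 0, 0), PySem.Dict.empty, -1)
  [s.1.1, s.1.2.1, s.1.2.2]

-- ===== PORT B =====
def solveAltGo (p : List Int) (best : Nat) : List Int → List Int
  | [] => [0, 0, 0]          -- unreachable fallback, mirrors Source B's final 'return res'
  | i :: rest =>
      let ele := PySem.List.pyGetD p i 0
      if (PySem.List.slice p none (some (i + 1))).count ele = best then
        [ele, ((PySem.List.index? p ele).getD 0 : Nat), i]
      else solveAltGo p best rest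

def solve_alt (n : Int) (arr : List Int) : List Int :=
  if n ≤ 0 then [0, 0, 0]
  else
    let p := PySem.List.slice arr none (some n)
    let best := (PySem.List.max? (p.map fun x => p.count x) (fun v => v)).getD 0
    solveAltGo p best (PySem.List.pyRange 0 n 1)


-- ===== PRECONDITION & SPEC =====
-- Pre_solve: A evaluates arr[i] for every i in range(n), so it raises IndexError unless n <= len(arr).
def Pre_solve (n : Int) (arr : List Int) : Prop := n ≤ (arr.length : Int)
instance (n : Int) (arr : List Int) : Decidable (Pre_solve n arr) := by unfold Pre_solve; infer_instance
def pvWitness_solve : Int × List Int := (4, [2, 7, 2, 7])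

def Spec_solve (n : Int) (arr : List Int) (out : List Int) : Prop := out = solve_alt n arr
instance (n : Int) (arr : List Int) (out : List Int) : Decidable (Spec_solve n arr out) := by unfold Spec_solve; infer_instance

-- ===== CLAIM (what is proved, stated in full; the proofs are below) =====
def Claim_equal_solve : Prop := ∀ (n : Int) (arr : List Int), Dom_solve n arr → Pre_solve n arr → Spec_solve n arr (solve n arr)

-- ===== LEMMAS AND PROOFS =====

-- reasoning vocabulary over the n-prefix p (proof-only definitions)
def pvX (p : List Int) (j : Nat) : Int := p.getD j 0
def pvG (p : List Int) (j : Nat) : Nat := (p.take (j + 1)).count (pvX p j)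
def pvMx (p : List Int) (k : Nat) : Nat := ((List.range k).map (pvG p)).foldl max 0
def pvJst (p : List Int) (k : Nat) : Nat :=
  (((List.range k).find? (fun j => pvG p j == pvMx p k)).getD 0)
def pvOcc (p : List Int) (k : Nat) (e : Int) : List Int :=
  ((List.range k).filter (fun j => pvX p j == e)).map (fun (j : Nat) => (j : Int))
def pvFi (p : List Int) (e : Int) : Nat := (PySem.List.index? p e).getD 0

lemma pv_count_take (p : List Int) (k : Nat) (e : Int) (hk : k ≤ p.length) :
    (p.take k).count e = (List.range k).countP (fun j => pvX p j == e) := by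
  induction k with
  | zero => simp
  | succ k ih =>
    have hlt : k < p.length := by omega
    rw [List.take_succ, List.range_succ, List.count_append, List.countP_append, ih (by omega)]
    simp [pvX, List.getD_eq_getElem?_getD, List.getElem?_eq_getElem hlt, List.count_cons]

lemma pv_occ_succ (p : List Int) (k : Nat) (e : Int) :
    pvOcc p (k + 1) e = pvOcc p k e ++ (if pvX p k == e then [(k : Int)] else []) := by
  simp only [pvOcc, List.range_succ, List.filter_append]
  by_cases h : pvX p k == e <;> simp [h]

lemma pv_occ_length (p : List Int) (k : Nat) (e : Int) (hk : k ≤ p.length) :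
    (pvOcc p k e).length = (p.take k).count e := by
  rw [pv_count_take p k e hk]
  simp only [pvOcc, List.length_map]
  exact List.countP_eq_length_filter.symm

lemma pv_mx_succ (p : List Int) (k : Nat) : pvMx p (k + 1) = max (pvMx p k) (pvG p k) := by
  simp only [pvMx, List.range_succ, List.map_append, List.foldl_append]
  simp

lemma pv_g_le_mx (p : List Int) (k j : Nat) (hj : j < k) : pvG p j ≤ pvMx p k := by
  have := (PySem.List.le_foldl_max ((List.range k).map (pvG p)) 0).2
  exact this _ (List.mem_map_of_mem (List.mem_range.2 hj))

lemma pv_g_pos (p : List Int) (j : Nat) (hj : j < p.length) : 1 ≤ pvG p j := by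
  simp only [pvG]
  rw [Nat.one_le_iff_ne_zero, Ne, List.count_eq_zero]
  intro hme
  apply hme
  have hjt : j < (p.take (j+1)).length := by simp; omega
  have : (p.take (j+1))[j] = p[j] := List.getElem_take
  rw [pvX, List.getD_eq_getElem?_getD, List.getElem?_eq_getElem hj]
  simpa [this] using List.getElem_mem hjt

lemma pv_mx_attained (p : List Int) (k : Nat) (hk1 : 1 ≤ k) (hk : k ≤ p.length) :
    ∃ j < k, pvG p j = pvMx p k := by
  rcases PySem.List.foldl_max_mem ((List.range k).map (pvG p)) 0 with h | h
  · exfalso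
    have h0 : pvG p 0 ≤ pvMx p k := pv_g_le_mx p k 0 hk1
    have h1 : 1 ≤ pvG p 0 := pv_g_pos p 0 (by omega)
    simp only [pvMx] at h0 h ⊢
    omega
  · rcases List.mem_map.1 h with ⟨j, hj, hgj⟩
    exact ⟨j, List.mem_range.1 hj, hgj⟩

lemma pv_find_first (k N : Nat) (pred : Nat → Bool) (hk : k < N)
    (hbefore : ∀ j < k, pred j = false) (hpk : pred k = true) :
    (List.range N).find? pred = some k := by
  rw [show N = k + ((N - k - 1) + 1) by omega, List.range_add, List.find?_append]
  rw [List.find?_eq_none.2 (fun x hx => by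
    simp only [Bool.not_eq_true]
    exact hbefore x (List.mem_range.1 hx))]
  rw [List.range_succ_eq_map, List.map_cons]
  simp [hpk]

lemma pv_jst_record (p : List Int) (k : Nat) (hrec : pvMx p k < pvG p k) :
    pvJst p (k + 1) = k := by
  have hmx1 : pvMx p (k + 1) = pvG p k := by rw [pv_mx_succ]; omega
  rw [pvJst, hmx1, pv_find_first k (k + 1) _ (by omega)
    (fun j hj => by
      have := pv_g_le_mx p k j hj
      rw [beq_eq_false_iff_ne]; omega)
    (by simp)]
  rfl

lemma pv_jst_keep (p : List Int) (k : Nat) (hk1 : 1 ≤ k) (hk : k + 1 ≤ p.length)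
    (hrec : pvG p k ≤ pvMx p k) : pvJst p (k + 1) = pvJst p k ∧ pvMx p (k + 1) = pvMx p k := by
  have hmx : pvMx p (k + 1) = pvMx p k := by rw [pv_mx_succ]; omega
  refine ⟨?_, hmx⟩
  rw [pvJst, pvJst, hmx, List.range_succ, List.find?_append]
  have hs : ((List.range k).find? (fun j => pvG p j == pvMx p k)).isSome := by
    rcases pv_mx_attained p k hk1 (by omega) with ⟨j, hj, hgj⟩
    exact List.find?_isSome.2 ⟨j, List.mem_range.2 hj, by simp [hgj]⟩
  rcases Option.isSome_iff_exists.1 hs with ⟨w, hw⟩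
  rw [hw]
  rfl

lemma pv_occ_head (p : List Int) (k : Nat) (e : Int) (hk : k ≤ p.length)
    (he : e ∈ p.take k) : (pvOcc p k e).headD 0 = ((pvFi p e : Nat) : Int) := by
  have hep : e ∈ p := List.mem_of_mem_take he
  rcases Option.isSome_iff_exists.1 ((PySem.List.index?_isSome_iff p e).2 hep) with ⟨j0, hj0⟩
  rcases PySem.List.getElem_of_index?_eq_some hj0 with ⟨hj0len, hval, hmin⟩
  rcases List.mem_iff_getElem.1 he with ⟨i, hi, hie⟩
  have hik : i < k := by simp [List.length_take] at hi; omega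
  have hilen : i < p.length := by simp [List.length_take] at hi; omega
  have hpi : p[i] = e := by rw [← List.getElem_take (h := hi)]; exact hie
  have hj0k : j0 < k := by
    by_contra hcon
    exact hmin i (lt_of_lt_of_le hik (Nat.le_of_not_lt hcon)) hpi
  have hfi : pvFi p e = j0 := by rw [pvFi, hj0]; rfl
  have hx : ∀ j (hj : j < p.length), pvX p j = p[j]'hj := fun j hj => by
    rw [pvX, List.getD_eq_getElem?_getD, List.getElem?_eq_getElem hj]; rfl
  have hhead : (pvOcc p k e).head? = some ((j0 : Nat) : Int) := by
    rw [pvOcc, List.head?_map, List.head?_filter, pv_find_first j0 k _ hj0k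
      (fun j hj => beq_eq_false_iff_ne.2 (by
        rw [hx j (by omega)]
        exact hmin j hj))
      (by rw [hx j0 hj0len, hval]; simp)]
    rfl
  rw [List.headD_eq_head?_getD, hhead, hfi]
  rfl

lemma pv_last_occ (p : List Int) (e : Int) (he : e ∈ p) :
    ∃ j < p.length, pvX p j = e ∧ (p.take (j + 1)).count e = p.count e := by
  induction p using List.reverseRecOn with
  | nil => simp at he
  | append_singleton q a ih =>
    by_cases hae : e = a
    · refine ⟨q.length, by simp, ?_, ?_⟩
      · rw [pvX, List.getD_eq_getElem?_getD, List.getElem?_append_right (le_refl _)]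
        simp [hae]
      · rw [List.take_of_length_le (by simp)]
    · have heq : e ∈ q := by
        rcases List.mem_append.1 he with h | h
        · exact h
        · simp at h; exact absurd h hae
      rcases ih heq with ⟨j, hj, hx, hc⟩
      refine ⟨j, by simp; omega, ?_, ?_⟩
      · rw [pvX, List.getD_eq_getElem?_getD, List.getElem?_append_left hj]
        exact hx
      · rw [List.take_append_of_le_length (by omega), hc, List.count_append]
        simp [Ne.symm hae]

lemma pv_best_eq_mx (p : List Int) (hp : p ≠ []) :
    (PySem.List.max? (p.map fun x => p.count x) (fun v => v)).getD 0 = pvMx p p.length := by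
  rcases hmax : PySem.List.max? (p.map fun x => p.count x) (fun v => v) with _ | m
  · rw [PySem.List.max?_eq_none_iff, List.map_eq_nil_iff] at hmax
    exact absurd hmax hp
  · have hm : m ∈ p.map fun x => p.count x := PySem.List.max?_mem hmax
    rcases List.mem_map.1 hm with ⟨e, hep, hme⟩
    have hlen1 : 1 ≤ p.length := List.length_pos_iff.2 hp
    have hle : m ≤ pvMx p p.length := by
      rcases pv_last_occ p e hep with ⟨j, hj, hxj, hcj⟩
      have : pvG p j = p.count e := by rw [pvG, hxj, hcj]
      have := pv_g_le_mx p p.length j hj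
      omega
    have hge : pvMx p p.length ≤ m := by
      rcases pv_mx_attained p p.length hlen1 (le_refl _) with ⟨j, hj, hgj⟩
      have hxmem : pvX p j ∈ p := by
        rw [pvX, List.getD_eq_getElem?_getD, List.getElem?_eq_getElem hj]
        exact List.getElem_mem hj
      have h1 : pvG p j ≤ p.count (pvX p j) :=
        (List.take_sublist _ _).count_le _
      have h2 : p.count (pvX p j) ≤ m :=
        PySem.List.max?_isMax hmax _ (List.mem_map_of_mem hxmem)
      omega
    have : m = pvMx p p.length := le_antisymm hle hge
    simpa using this

lemma pv_B_go (p : List Int) (F : Nat) (hF : F = pvMx p p.length)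
    (m k : Nat) (hkm : k + m = p.length)
    (hbefore : ∀ j < k, pvG p j ≠ F) (hex : ∃ j < p.length, pvG p j = F) :
    solveAltGo p F ((List.range' k m).map (fun (j : Nat) => (j : Int))) =
      [pvX p (pvJst p p.length),
       ((pvFi p (pvX p (pvJst p p.length)) : Nat) : Int),
       ((pvJst p p.length : Nat) : Int)] := by
  induction m generalizing k with
  | zero =>
    exfalso
    rcases hex with ⟨j, hj, hgj⟩
    exact hbefore j (by omega) hgj
  | succ m ih =>
    rw [List.range'_succ, List.map_cons, solveAltGo]
    have hsl : PySem.List.slice p none (some ((k : Int) + 1)) = p.take (k + 1) := by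
      rw [show ((k : Int) + 1) = ((k + 1 : Nat) : Int) by push_cast; ring,
        PySem.List.slice_to_natCast]
    simp only [PySem.List.pyGetD_natCast, hsl]
    have hxd : p.getD k 0 = pvX p k := rfl
    rw [hxd]
    by_cases hc : (p.take (k + 1)).count (pvX p k) = F
    · rw [if_pos hc]
      have hjst : pvJst p p.length = k := by
        rw [pvJst, pv_find_first k p.length _ (by omega)
          (fun j hj => beq_eq_false_iff_ne.2 (by rw [← hF]; exact hbefore j hj))
          (by rw [beq_iff_eq, ← hF]; exact hc)]
        rfl
      simp [pvFi, hjst]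
    · rw [if_neg hc]
      exact ih (k + 1) (by omega)
        (fun j hj => by
          rcases Nat.lt_succ_iff_lt_or_eq.1 hj with h | h
          · exact hbefore j h
          · subst h; exact hc)

lemma pv_x_mem_take (p : List Int) (j k : Nat) (hj : j < k) (hk : k ≤ p.length) :
    pvX p j ∈ p.take k := by
  have hjl : j < p.length := by omega
  have h1 : j < (p.take k).length := by simp [List.length_take]; omega
  have h2 : (p.take k)[j] = p[j] := List.getElem_take
  rw [pvX, List.getD_eq_getElem?_getD, List.getElem?_eq_getElem hjl]
  simpa [h2] using List.getElem_mem h1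

lemma pv_mem_take_succ (p : List Int) (k : Nat) (e : Int) (hk : k < p.length) :
    e ∈ p.take (k + 1) ↔ e ∈ p.take k ∨ e = pvX p k := by
  rw [List.take_add_one, List.mem_append, List.getElem?_eq_getElem hk]
  simp [pvX, List.getD_eq_getElem?_getD, List.getElem?_eq_getElem hk]

lemma pv_occ_nil_of_not_mem (p : List Int) (k : Nat) (e : Int) (hk : k ≤ p.length)
    (he : e ∉ p.take k) : pvOcc p k e = [] := by
  rw [pvOcc, List.map_eq_nil_iff, List.filter_eq_nil_iff]
  intro j hj
  simp only [beq_iff_eq]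
  intro hxe
  exact he (hxe ▸ pv_x_mem_take p j k (List.mem_range.1 hj) hk)

lemma pv_A_invariant (arr : List Int) (N : Nat) (hN : N ≤ arr.length) (k : Nat) (hk : k ≤ N) :
    ∃ d : PySem.Dict Int (List Int),
      ((List.range k).map (fun (j : Nat) => (j : Int))).foldl (solveStepA arr)
          ((0, 0, 0), PySem.Dict.empty, -1) =
        ((if k = 0 then ((0 : Int), (0 : Int), (0 : Int))
          else (pvX (arr.take N) (pvJst (arr.take N) k),
                ((pvFi (arr.take N) (pvX (arr.take N) (pvJst (arr.take N) k)) : Nat) : Int),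
                ((pvJst (arr.take N) k : Nat) : Int))),
         d, (if k = 0 then (-1 : Int) else ((pvMx (arr.take N) k : Nat) : Int))) ∧
      (∀ e, d.getD e [] = pvOcc (arr.take N) k e) ∧
      (∀ e, d.contains e = true ↔ e ∈ (arr.take N).take k) := by
  set p := arr.take N with hp
  have hplen : p.length = N := by rw [hp, List.length_take]; omega
  induction k with
  | zero =>
    refine ⟨PySem.Dict.empty, by simp, fun e => by simp [pvOcc], fun e => by simp⟩
  | succ k ih =>
    rcases ih (by omega) with ⟨d, hstate, hgetD, hcont⟩
    have hkN : k < N := by omega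
    have hkp : k < p.length := by omega
    rw [List.range_succ, List.map_append, List.foldl_append, hstate, List.map_cons,
      List.map_nil, List.foldl_cons, List.foldl_nil]
    have hele : PySem.List.pyGetD arr ((k : Nat) : Int) 0 = pvX p k := by
      rw [PySem.List.pyGetD_natCast, pvX, hp, List.getD_eq_getElem?_getD,
        List.getD_eq_getElem?_getD, List.getElem?_take_of_lt hkN]
    -- the updated dictionary
    have hd' : ∀ d' : PySem.Dict Int (List Int),
        d' = (if d.contains (pvX p k) then d.modify (pvX p k) [] (fun f => f ++ [((k : Nat) : Int)])
              else d.insert (pvX p k) [((k : Nat) : Int)]) →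
        (∀ e, d'.getD e [] = pvOcc p (k + 1) e) ∧
        (∀ e, d'.contains e = true ↔ e ∈ p.take (k + 1)) := by
      intro d' hd'
      by_cases hmem : pvX p k ∈ p.take k
      · have hctrue : d.contains (pvX p k) = true := (hcont _).2 hmem
        rw [hctrue, if_pos rfl] at hd'
        constructor
        · intro e
          rw [hd', PySem.Dict.getD_modify, pv_occ_succ]
          by_cases hete : e = pvX p k
          · subst hete
            rw [if_pos rfl, hgetD]
            simp
          · rw [if_neg hete, hgetD,
              if_neg (by simp only [beq_iff_eq]; exact fun h => hete h.symm), List.append_nil]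
        · intro e
          rw [hd', PySem.Dict.contains_modify, Bool.or_eq_true, beq_iff_eq,
            pv_mem_take_succ p k e hkp, hcont, or_comm]
      · have hcfalse : d.contains (pvX p k) = false := by
          cases hc : d.contains (pvX p k)
          · rfl
          · exact absurd ((hcont _).1 hc) hmem
        rw [hcfalse, if_neg (by simp)] at hd'
        constructor
        · intro e
          rw [hd', PySem.Dict.getD_insert, pv_occ_succ]
          by_cases hete : e = pvX p k
          · subst hete
            rw [if_pos rfl, pv_occ_nil_of_not_mem p k _ (by omega) hmem]
            simp
          · rw [if_neg hete, hgetD,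
              if_neg (by simp only [beq_iff_eq]; exact fun h => hete h.symm), List.append_nil]
        · intro e
          rw [hd', PySem.Dict.contains_insert, Bool.or_eq_true, beq_iff_eq,
            pv_mem_take_succ p k e hkp, hcont, or_comm]
    simp only [solveStepA, hele]
    set d'' := (if d.contains (pvX p k) then d.modify (pvX p k) [] (fun f => f ++ [((k : Nat) : Int)])
                else d.insert (pvX p k) [((k : Nat) : Int)]) with hd''def
    obtain ⟨hgetD', hcont'⟩ := hd' d'' hd''def
    have hflen : (d''.getD (pvX p k) []).length = pvG p k := by
      rw [hgetD', pv_occ_length p (k + 1) _ (by omega)]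
      rfl
    have hhead : (d''.getD (pvX p k) []).headD 0 = ((pvFi p (pvX p k) : Nat) : Int) := by
      rw [hgetD']
      exact pv_occ_head p (k + 1) _ (by omega) (pv_x_mem_take p k (k + 1) (by omega) (by omega))
    have hlast : (d''.getD (pvX p k) []).getLastD 0 = ((k : Nat) : Int) := by
      rw [hgetD', pv_occ_succ]
      simp
    have hg1 : 1 ≤ pvG p k := pv_g_pos p k hkp
    by_cases hrec : pvMx p k < pvG p k
    · -- a new record is set
      have hjst1 : pvJst p (k + 1) = k := pv_jst_record p k hrec
      have hmx1 : pvMx p (k + 1) = pvG p k := by rw [pv_mx_succ]; omega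
      refine ⟨d'', ?_, hgetD', hcont'⟩
      rw [if_pos]
      · rw [if_neg (Nat.succ_ne_zero k), hjst1, hmx1, hflen, hhead, hlast,
          if_neg (Nat.succ_ne_zero k)]
      · rw [hflen]
        by_cases hk0 : k = 0
        · rw [if_pos hk0]
          omega
        · rw [if_neg hk0]
          exact_mod_cast hrec
    · -- no record: state unchanged
      have hk0 : k ≠ 0 := by
        intro h
        subst h
        simp only [pvMx, List.range_zero, List.map_nil, List.foldl_nil] at hrec
        omega
      rcases pv_jst_keep p k (by omega) (by omega) (by omega) with ⟨hjk, hmk⟩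
      refine ⟨d'', ?_, hgetD', hcont'⟩
      rw [if_neg]
      · rw [if_neg hk0, if_neg (Nat.succ_ne_zero k), hjk, hmk, if_neg hk0,
          if_neg (Nat.succ_ne_zero k)]
      · rw [hflen, if_neg hk0]
        intro hcon
        exact hrec (by exact_mod_cast hcon)

lemma pv_main : ∀ (n : Int) (arr : List Int), n ≤ (arr.length : Int) →
    solve n arr = solve_alt n arr := by
  intro n arr hpre
  by_cases hn : n ≤ 0
  · have hr : PySem.List.pyRange 0 n 1 = [] := by
      rw [PySem.List.pyRange_one, show (n - 0).toNat = 0 by omega]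
      rfl
    rw [solve, solve_alt, if_pos hn, hr]
    rfl
  · have hNpos : 1 ≤ n.toNat := by omega
    have hN : n.toNat ≤ arr.length := by omega
    have hrange : PySem.List.pyRange 0 n 1 = (List.range n.toNat).map (fun (j : Nat) => (j : Int)) := by
      rw [PySem.List.pyRange_one]
      simp
    have hplen : (arr.take n.toNat).length = n.toNat := by
      rw [List.length_take]
      omega
    have hslice : PySem.List.slice arr none (some n) = arr.take n.toNat := by
      rw [show n = ((n.toNat : Nat) : Int) from (Int.toNat_of_nonneg (by omega)).symm,
        PySem.List.slice_to_natCast]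
      simp
      omega
    rcases pv_A_invariant arr n.toNat hN n.toNat (le_refl _) with ⟨d, hstate, -, -⟩
    have hex : ∃ j < (arr.take n.toNat).length, pvG (arr.take n.toNat) j
        = pvMx (arr.take n.toNat) (arr.take n.toNat).length := by
      rcases pv_mx_attained (arr.take n.toNat) (arr.take n.toNat).length
        (by omega) (le_refl _) with ⟨j, hj, hgj⟩
      exact ⟨j, hj, hgj⟩
    have hne : arr.take n.toNat ≠ [] := by
      intro h
      rw [h] at hplen
      simp at hplen
      omega
    rw [solve, solve_alt, if_neg hn]
    simp only [hrange, hslice, hstate]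
    rw [pv_best_eq_mx _ hne, List.range_eq_range',
      pv_B_go (arr.take n.toNat) _ rfl n.toNat 0 (by omega)
        (fun j hj => (Nat.not_lt_zero j hj).elim) hex,
      hplen]
    rw [if_neg (by omega : ¬ n.toNat = 0)]

-- ===== VERDICT (by name: the statement is the Claim_ definition above) =====
theorem solve_spec : Claim_equal_solve := by
  intro n arr _ hpre
  unfold Spec_solve
  exact pv_main n arr hpre
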